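-- pv_equiv track=rewrite | github.com/heptocat/CryptoGame | lib/cryptofunctions.py | bobreverse
-- ===== SOURCE A (Python) =====
-- def bobreverse(text):
-- 	newstring = ""
-- 	skip = 0
-- 	for i in range( len(text) ):
--
-- 		if skip != 0:
-- 			skip = skip - 1
-- 		elif text[i].lower() in "bcdfghjklmnpqrstwvxyz":
-- 			newstring = newstring + text[i]
-- 			skip = 2
-- 		else:
-- 			newstring = newstring + text[i]
--
-- 	return newstring
-- ===== SOURCE B (Python) =====
-- def bobreverse(text):
--     out = []
--     i = 0
--     n = len(text)
--     while i < n: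
--         out.append(text[i])
--         if text[i].lower() in "bcdfghjklmnpqrstwvxyz":
--             i += 3
--         else:
--             i += 1
--     return ''.join(out)
-- ===== Notes on version B (the rewrite author's own statement) =====
-- stated objective: simpler
-- what changed: Replaces the for-loop over every index with a per-index skip countdown by a while-loop with a jumping cursor that visits only the kept positions (advance by 3 after a consonant, else by 1), collecting characters in a list joined at the end.
import Mathlib
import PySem

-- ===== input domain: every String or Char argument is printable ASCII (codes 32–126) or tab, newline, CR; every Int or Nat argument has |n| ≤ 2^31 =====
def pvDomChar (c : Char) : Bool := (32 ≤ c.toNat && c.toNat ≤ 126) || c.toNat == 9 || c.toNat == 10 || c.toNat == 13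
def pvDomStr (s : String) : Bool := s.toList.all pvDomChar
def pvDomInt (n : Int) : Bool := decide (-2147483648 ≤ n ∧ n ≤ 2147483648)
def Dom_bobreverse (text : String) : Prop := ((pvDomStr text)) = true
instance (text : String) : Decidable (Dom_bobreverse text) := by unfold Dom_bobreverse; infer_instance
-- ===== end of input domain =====

-- B replaces A's per-index skip countdown by a jumping cursor that touches only kept positions (objective: simpler).

-- ===== PORT A =====
-- text[i].lower() in "bcdfghjklmnpqrstwvxyz"  (the 1-char membership test both Pythons perform)
def pvIsConsonant (c : Char) : Bool :=
  PySem.Chars.isIn [PySem.Chars.lowerChar c] "bcdfghjklmnpqrstwvxyz".toList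

-- A's loop body as one fold step over (newstring, skip)
def pvStepA (st : List Char × Int) (c : Char) : List Char × Int :=
  if st.2 ≠ 0 then (st.1, st.2 - 1)
  else if pvIsConsonant c then (st.1 ++ [c], 2)
  else (st.1 ++ [c], 0)

def bobreverse (text : String) : String :=
  String.mk (text.toList.foldl pvStepA ([], 0)).1

-- ===== PORT B =====
def pvLoopB (cs : List Char) (i : Nat) (acc : List Char) : List Char :=
  if h : i < cs.length then
    let c := cs[i]
    if pvIsConsonant c then pvLoopB cs (i + 3) (acc ++ [c])
    else pvLoopB cs (i + 1) (acc ++ [c])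
  else acc
termination_by cs.length - i

def bobreverse_alt (text : String) : String :=
  String.mk (pvLoopB text.toList 0 [])

-- ===== PRECONDITION & SPEC =====
def Spec_bobreverse (text : String) (out : String) : Prop := out = bobreverse_alt text
instance (text : String) (out : String) : Decidable (Spec_bobreverse text out) := by unfold Spec_bobreverse; infer_instance

-- ===== CLAIM (what is proved, stated in full; the proofs are below) =====
def Claim_equal_bobreverse : Prop := ∀ (text : String), Dom_bobreverse text → Spec_bobreverse text (bobreverse text)

-- ===== LEMMAS AND PROOFS =====

-- A's fold with a positive skip counter s just drops the next s characters.
theorem pvStepA_skip (l : List Char) (acc : List Char) (s : Nat) :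
    (l.foldl pvStepA (acc, (s : Int))).1 = ((l.drop s).foldl pvStepA (acc, 0)).1 := by
  induction l generalizing s acc with
  | nil => simp
  | cons c l ih =>
    cases s with
    | zero => simp
    | succ k =>
      have h1 : pvStepA (acc, ((k + 1 : Nat) : Int)) c = (acc, (k : Int)) := by
        simp [pvStepA]; omega
      simp only [List.foldl_cons, h1, List.drop_succ_cons]
      exact ih acc k

-- B's jumping cursor computes A's fold on the remaining suffix.
theorem pvLoopB_eq (n : Nat) : ∀ (cs : List Char) (i : Nat) (acc : List Char),
    cs.length - i ≤ n →
    pvLoopB cs i acc = ((cs.drop i).foldl pvStepA (acc, 0)).1 := by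
  induction n with
  | zero =>
    intro cs i acc hle
    have hge : cs.length ≤ i := by omega
    rw [pvLoopB]
    simp [List.drop_eq_nil_of_le hge, Nat.not_lt_of_le hge]
  | succ n ih =>
    intro cs i acc hle
    rw [pvLoopB]
    by_cases h : i < cs.length
    · simp only [h, dif_pos]
      rw [List.drop_eq_getElem_cons h, List.foldl_cons]
      by_cases hc : pvIsConsonant cs[i]
      · have hstep : pvStepA (acc, 0) cs[i] = (acc ++ [cs[i]], 2) := by
          simp [pvStepA, hc]
        rw [hc, if_pos rfl, hstep]
        have h2 : ((2 : Nat) : Int) = (2 : Int) := rfl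
        rw [← h2, pvStepA_skip, List.drop_drop]
        have h3 : i + 1 + 2 = i + 3 := by omega
        rw [h3]
        exact ih cs (i + 3) (acc ++ [cs[i]]) (by omega)
      · have hstep : pvStepA (acc, 0) cs[i] = (acc ++ [cs[i]], 0) := by
          simp [pvStepA, hc]
        rw [eq_false_of_ne_true hc, if_neg (by simp), hstep]
        exact ih cs (i + 1) (acc ++ [cs[i]]) (by omega)
    · simp [h, List.drop_eq_nil_of_le (Nat.le_of_not_lt h)]

-- ===== VERDICT (by name: the statement is the Claim_ definition above) =====
theorem bobreverse_spec : Claim_equal_bobreverse := by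
  intro text _
  unfold Spec_bobreverse bobreverse bobreverse_alt
  rw [pvLoopB_eq text.toList.length text.toList 0 [] (by omega)]
  simp
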